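-- pv_equiv track=rewrite | github.com/bu-bu-xxx/leetcode-python-code | 其他-含每日一题6/Q1807. 替换字符串中的括号内容/answer1.py | evaluate
-- ===== SOURCE A (Python) =====
-- from typing import List
--
-- def evaluate(s: str, knowledge: List[List[str]]) -> str:
--     mark = 0
--     tmp_key = ''
--     res = ''
--     knowledge_dict = dict()
--     for key, value in knowledge:
--         knowledge_dict[key] = value
--     for ch in s:
--         if mark == 0:
--             if ch == '(':
--                 mark = 1
--             else:
--                 res += ch
--         elif mark == 1:
--             if ch == ')':
--                 mark = 0
--                 if tmp_key in knowledge_dict: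
--                     res += knowledge_dict[tmp_key]
--                 else:
--                     res += '?'
--                 tmp_key = ''
--             else:
--                 tmp_key += ch
--
--     return res
-- ===== SOURCE B (Python) =====
-- def evaluate(s, knowledge):
--     knowledge_dict = {key: value for key, value in knowledge}
--     out = []
--     i = 0
--     n = len(s)
--     while i < n:
--         if s[i] == '(':
--             j = s.find(')', i)
--             if j == -1:
--                 break  # unclosed '(': everything after it is dropped
--             out.append(knowledge_dict.get(s[i + 1:j], '?'))
--             i = j + 1
--         else:
--             out.append(s[i])
--             i += 1
--     return ''.join(out)
-- ===== Notes on version B (the rewrite author's own statement) =====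
-- stated objective: idiomatic
-- what changed: Replaces A's character-state-machine (mark flag + tmp_key accumulator) with a find-and-jump span scan: on '(' locate the matching ')' with str.find, look up the whole slice at once, and jump past it; pieces are collected in a list and joined once.
import Mathlib
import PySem

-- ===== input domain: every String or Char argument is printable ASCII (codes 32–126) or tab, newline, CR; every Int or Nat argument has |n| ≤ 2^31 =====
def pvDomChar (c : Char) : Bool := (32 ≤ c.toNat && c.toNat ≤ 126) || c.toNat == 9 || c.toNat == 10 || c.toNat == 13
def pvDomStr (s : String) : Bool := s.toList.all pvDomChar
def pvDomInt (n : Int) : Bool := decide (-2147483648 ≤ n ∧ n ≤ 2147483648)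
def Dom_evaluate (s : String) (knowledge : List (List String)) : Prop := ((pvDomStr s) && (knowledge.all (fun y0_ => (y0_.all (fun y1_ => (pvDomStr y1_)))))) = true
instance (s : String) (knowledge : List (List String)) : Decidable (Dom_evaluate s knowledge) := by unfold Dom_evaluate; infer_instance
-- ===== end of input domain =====

-- B replaces A's character-by-character state machine (mark flag + tmp_key accumulator)
-- with a find-and-jump span scan over the string; same return values, no speed claim.

-- ===== PORT A =====
-- 'for key, value in knowledge: knowledge_dict[key] = value' (a row of length ≠ 2 raises in Python: outside Pre_)
def buildDictA (knowledge : List (List String)) : PySem.Dict String String :=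
  knowledge.foldl (fun d row =>
    match row with
    | [key, value] => d.insert key value
    | _ => d) PySem.Dict.empty

-- the body of A's 'for ch in s' loop, on state (mark, tmp_key, res)
def stepA (d : PySem.Dict String String) : Nat × List Char × List Char → Char → Nat × List Char × List Char
  | (mark, tmpKey, res), ch =>
    if mark = 0 then
      if ch = '(' then (1, tmpKey, res)
      else (mark, tmpKey, res ++ [ch])
    else if mark = 1 then
      if ch = ')' then
        (0, [], res ++ (if d.contains (String.ofList tmpKey) then
                          ((d.get? (String.ofList tmpKey)).getD "").toList else ['?']))
      else (mark, tmpKey ++ [ch], res)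
    else (mark, tmpKey, res)

def evaluate (s : String) (knowledge : List (List String)) : String :=
  String.ofList ((s.toList.foldl (stepA (buildDictA knowledge)) (0, [], [])).2.2)

-- ===== PORT B =====
-- B's dict comprehension {key: value for key, value in knowledge}
def buildDictB (knowledge : List (List String)) : PySem.Dict String String :=
  knowledge.foldl (fun d row =>
    match row with
    | [key, value] => d.insert key value
    | _ => d) PySem.Dict.empty

-- B's while loop: on '(' find the next ')' (takeWhile/dropWhile = s.find(')', i) + slice), look the
-- whole span up at once and jump past it; if there is no ')', break (drop the rest); else copy the char.
def bscan (d : PySem.Dict String String) : List Char → List Char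
  | [] => []
  | c :: rest =>
    if c = '(' then
      match hdrop : rest.dropWhile (fun x => x ≠ ')') with
      | [] => []
      | _ :: tail =>
          (d.getD (String.ofList (rest.takeWhile (fun x => x ≠ ')'))) "?").toList ++ bscan d tail
    else c :: bscan d rest
termination_by l => l.length
decreasing_by
  · have h := List.length_dropWhile_le (fun x => x ≠ ')') rest
    rw [hdrop] at h
    simp at h ⊢
    omega
  · simp

def evaluate_alt (s : String) (knowledge : List (List String)) : String :=
  String.ofList (bscan (buildDictB knowledge) s.toList)

-- ===== PRECONDITION & SPEC =====
-- Pre_ excludes knowledge rows that do not have exactly two elements: Python A raises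
-- ValueError there (tuple unpacking), and so does B's dict comprehension.
def Pre_evaluate (s : String) (knowledge : List (List String)) : Prop :=
  ∀ row ∈ knowledge, row.length = 2
instance (s : String) (knowledge : List (List String)) : Decidable (Pre_evaluate s knowledge) := by
  unfold Pre_evaluate; infer_instance

def pvWitness_evaluate : String × List (List String) := ("hi(a)x", [["a", "bob"]])

def Spec_evaluate (s : String) (knowledge : List (List String)) (out : String) : Prop := out = evaluate_alt s knowledge
instance (s : String) (knowledge : List (List String)) (out : String) : Decidable (Spec_evaluate s knowledge out) := by unfold Spec_evaluate; infer_instance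

-- ===== CLAIM (what is proved, stated in full; the proofs are below) =====
def Claim_equal_evaluate : Prop := ∀ (s : String) (knowledge : List (List String)), Dom_evaluate s knowledge → Pre_evaluate s knowledge → Spec_evaluate s knowledge (evaluate s knowledge)

-- ===== LEMMAS AND PROOFS =====

-- A's mark=1 state, as a function of the pending key and the rest of the string
def tailScan (d : PySem.Dict String String) (tmp : List Char) : List Char → List Char
  | [] => []
  | c :: rest =>
    if c = ')' then
      (if d.contains (String.ofList tmp) then ((d.get? (String.ofList tmp)).getD "").toList else ['?'])
        ++ bscan d rest
    else tailScan d (tmp ++ [c]) rest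

theorem lookup_eq (d : PySem.Dict String String) (k : String) :
    (if d.contains k then ((d.get? k).getD "").toList else ['?']) = (d.getD k "?").toList := by
  rw [PySem.Dict.getD_eq_get?_getD, PySem.Dict.contains_eq_isSome_get?]
  cases d.get? k <;> simp

theorem tailScan_eq (d : PySem.Dict String String) (l : List Char) : ∀ tmp,
    tailScan d tmp l =
      match l.dropWhile (fun x => x ≠ ')') with
      | [] => []
      | _ :: tail =>
          (d.getD (String.ofList (tmp ++ l.takeWhile (fun x => x ≠ ')'))) "?").toList ++ bscan d tail := by
  induction l with
  | nil => intro tmp; simp [tailScan]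
  | cons c rest ih =>
    intro tmp
    by_cases hc : c = ')'
    · subst hc
      simp [tailScan, List.dropWhile, List.takeWhile, lookup_eq]
    · simp [tailScan, hc, List.dropWhile, List.takeWhile, ih (tmp ++ [c])]

theorem bscan_paren (d : PySem.Dict String String) (rest : List Char) :
    bscan d ('(' :: rest) = tailScan d [] rest := by
  rw [tailScan_eq]
  simp only [bscan, ite_true, List.nil_append]
  cases List.dropWhile (fun x => x ≠ ')') rest <;> rfl

theorem foldl_stepA (d : PySem.Dict String String) (l : List Char) :
    (∀ res, (l.foldl (stepA d) (0, [], res)).2.2 = res ++ bscan d l) ∧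
    (∀ tmp res, (l.foldl (stepA d) (1, tmp, res)).2.2 = res ++ tailScan d tmp l) := by
  induction l with
  | nil => exact ⟨fun res => by simp [bscan], fun tmp res => by simp [tailScan]⟩
  | cons c rest ih =>
    refine ⟨fun res => ?_, fun tmp res => ?_⟩
    · by_cases hc : c = '('
      · subst hc
        have h : stepA d (0, [], res) '(' = (1, [], res) := by simp [stepA]
        rw [List.foldl_cons, h, ih.2 [] res, bscan_paren]
      · have h : stepA d (0, [], res) c = (0, [], res ++ [c]) := by simp [stepA, hc]
        rw [List.foldl_cons, h, ih.1 (res ++ [c])]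
        simp [bscan, hc]
    · by_cases hc : c = ')'
      · subst hc
        have h : stepA d (1, tmp, res) ')' =
            (0, [], res ++ (if d.contains (String.ofList tmp) then
              ((d.get? (String.ofList tmp)).getD "").toList else ['?'])) := by simp [stepA]
        rw [List.foldl_cons, h, ih.1]
        simp [tailScan, List.append_assoc]
      · have h : stepA d (1, tmp, res) c = (1, tmp ++ [c], res) := by simp [stepA, hc]
        rw [List.foldl_cons, h, ih.2 (tmp ++ [c]) res]
        simp [tailScan, hc]

theorem buildDictA_eq_buildDictB (knowledge : List (List String)) :
    buildDictA knowledge = buildDictB knowledge := by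
  unfold buildDictA buildDictB
  induction knowledge with
  | nil => rfl
  | cons row rest ih => cases row with
    | nil => simpa using ih
    | cons a t => cases t with
      | nil => simpa using ih
      | cons b t2 => cases t2 <;> simp_all

-- ===== VERDICT (by name: the statement is the Claim_ definition above) =====
theorem evaluate_spec : Claim_equal_evaluate := by
  intro s knowledge _ _
  show evaluate s knowledge = evaluate_alt s knowledge
  simp only [evaluate, evaluate_alt]
  rw [(foldl_stepA (buildDictA knowledge) s.toList).1 [], buildDictA_eq_buildDictB]
  simp
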